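-- pv_equiv track=rewrite | github.com/luis-perez-one/insurance-ML-regression | regression_utils.py | gen_dummy_cols_inner_combinations
-- ===== SOURCE A (Python) =====
-- import itertools
--
-- def gen_dummy_cols_inner_combinations(dummy_col_names):
--     #dummy_col_names should be a list of lists, ie
--     #[['sex_female', 'sex_male'], ['smoker_yes', 'smoker_no']]
--     dummy_cols_inner_combinations = []
--     for col_list in dummy_col_names:
--         col_list.sort()
--         list_lenght = len(col_list)
--         if list_lenght > 1:
--             for lenght in range(2, list_lenght+1):
--                 for subset in itertools.combinations(col_list, lenght):
--                     dummy_cols_inner_combinations.append(subset)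
--
--     dummy_cols_inner_combinations = [list(element) for element in dummy_cols_inner_combinations]
--     dummy_cols_inner_combinations = [' '.join(element) for element in dummy_cols_inner_combinations]
--
--     return(dummy_cols_inner_combinations)
-- ===== SOURCE B (Python) =====
-- def _powerset(xs):
--     # all subsets of xs, each keeping element order; for x::rest: subsets with x first, then those without
--     if not xs:
--         return [[]]
--     rest = _powerset(xs[1:])
--     return [[xs[0]] + s for s in rest] + rest
--
--
-- def gen_dummy_cols_inner_combinations(dummy_col_names):
--     # Like A, sorts each sub-list in place (same observable mutation).
--     result = []
--     for col_list in dummy_col_names: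
--         col_list.sort()
--         n = len(col_list)
--         if n > 1:
--             subsets = _powerset(col_list)
--             for k in range(2, n + 1):
--                 result.extend(' '.join(s) for s in subsets if len(s) == k)
--     return result
-- ===== Notes on version B (the rewrite author's own statement) =====
-- stated objective: alternative
-- what changed: Replaces the per-length itertools.combinations calls with one recursive powerset computed once per sub-list, whose length-k slices are emitted (joined on the fly) in the same length-then-lexicographic order.
import Mathlib
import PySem

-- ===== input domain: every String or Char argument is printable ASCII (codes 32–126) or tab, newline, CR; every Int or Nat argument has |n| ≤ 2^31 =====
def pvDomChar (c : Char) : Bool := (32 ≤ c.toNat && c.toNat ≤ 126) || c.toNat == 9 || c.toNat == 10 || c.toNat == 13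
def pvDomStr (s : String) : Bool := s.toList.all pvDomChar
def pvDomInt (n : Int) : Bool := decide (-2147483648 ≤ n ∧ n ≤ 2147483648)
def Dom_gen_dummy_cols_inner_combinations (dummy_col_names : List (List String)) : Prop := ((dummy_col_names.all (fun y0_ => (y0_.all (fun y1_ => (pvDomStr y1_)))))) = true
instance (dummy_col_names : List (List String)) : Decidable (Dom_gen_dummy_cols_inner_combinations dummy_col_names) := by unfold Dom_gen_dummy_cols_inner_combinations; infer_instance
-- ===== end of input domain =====

-- B computes one recursive powerset per sub-list and emits its length-k slices joined, instead of
-- per-length itertools.combinations calls; equivalence is about the RETURN value (both Pythons also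
-- sort each sub-list in place, identically).

-- ===== PORT A =====
-- itertools.combinations(xs, k): length-k combinations, lexicographic by position (exact semantics)
def pyCombinations (k : Nat) (xs : List String) : List (List String) :=
  match k, xs with
  | 0, _ => [[]]
  | _ + 1, [] => []
  | k + 1, x :: rest => ((pyCombinations k rest).map (fun s => x :: s)) ++ pyCombinations (k + 1) rest

def gen_dummy_cols_inner_combinations (dummy_col_names : List (List String)) : List String :=
  let combos := dummy_col_names.foldl (fun acc col_list =>
    let sortedl := PySem.List.sorted col_list (fun x => x) false
    let list_lenght : Int := sortedl.length
    if list_lenght > 1 then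
      (PySem.List.pyRange 2 (list_lenght + 1) 1).foldl (fun acc2 lenght =>
        (pyCombinations lenght.toNat sortedl).foldl (fun a subset => a ++ [subset]) acc2) acc
    else acc) []
  let lists := combos.map (fun element => element)
  lists.map (fun element => PySem.Str.join " " element)

-- ===== PORT B =====
-- all subsets of xs, keeping element order: subsets containing the head first, then the rest
def powersetB (xs : List String) : List (List String) :=
  match xs with
  | [] => [[]]
  | x :: rest => ((powersetB rest).map (fun s => x :: s)) ++ powersetB rest

def gen_dummy_cols_inner_combinations_alt (dummy_col_names : List (List String)) : List String :=
  dummy_col_names.foldl (fun result col_list =>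
    let sortedl := PySem.List.sorted col_list (fun x => x) false
    let n : Int := sortedl.length
    if n > 1 then
      let subsets := powersetB sortedl
      (PySem.List.pyRange 2 (n + 1) 1).foldl (fun r k =>
        r ++ ((subsets.filter (fun s => (s.length : Int) == k)).map
          (fun s => PySem.Str.join " " s))) result
    else result) []

-- ===== PRECONDITION & SPEC =====
def Spec_gen_dummy_cols_inner_combinations (dummy_col_names : List (List String)) (out : List String) : Prop := out = gen_dummy_cols_inner_combinations_alt dummy_col_names
instance (dummy_col_names : List (List String)) (out : List String) : Decidable (Spec_gen_dummy_cols_inner_combinations dummy_col_names out) := by unfold Spec_gen_dummy_cols_inner_combinations; infer_instance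

-- ===== CLAIM (what is proved, stated in full; the proofs are below) =====
def Claim_equal_gen_dummy_cols_inner_combinations : Prop := ∀ (dummy_col_names : List (List String)), Dom_gen_dummy_cols_inner_combinations dummy_col_names → Spec_gen_dummy_cols_inner_combinations dummy_col_names (gen_dummy_cols_inner_combinations dummy_col_names)

-- ===== LEMMAS AND PROOFS =====

-- the length-k slice of the powerset is exactly itertools.combinations(xs, k), in order
theorem powersetB_filter_eq (xs : List String) (k : Nat) :
    (powersetB xs).filter (fun s => s.length == k) = pyCombinations k xs := by
  induction xs generalizing k with
  | nil =>
    cases k <;> simp [powersetB, pyCombinations]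
  | cons x rest ih =>
    cases k with
    | zero =>
      simp only [powersetB, pyCombinations, List.filter_append, List.filter_map]
      have h1 : ((powersetB rest).filter (fun s => (x :: s).length == 0)) = [] := by
        simp
      have h2 : (powersetB rest).filter (fun s => s.length == 0) = pyCombinations 0 rest := ih 0
      rw [show (fun s => List.length s == 0) ∘ (fun s => x :: s) = fun s => (x :: s).length == 0 from rfl]
      rw [h1, h2]
      simp [pyCombinations]
    | succ k =>
      simp only [powersetB, pyCombinations, List.filter_append, List.filter_map]
      rw [show (fun s => List.length s == (k+1)) ∘ (fun s => x :: s) = fun s => s.length == k from by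
        funext s; simp]
      rw [ih k, ih (k+1)]

theorem flatMap_congr_mem {α β : Type} (l : List α) (f g : α → List β)
    (h : ∀ x ∈ l, f x = g x) : l.flatMap f = l.flatMap g := by
  induction l with
  | nil => rfl
  | cons x t ih =>
    simp only [List.flatMap_cons]
    rw [h x (List.mem_cons_self), ih (fun y hy => h y (List.mem_cons_of_mem _ hy))]

-- one sub-list's contribution, on each side, after both folds are flattened
theorem per_list_eq (sortedl : List String) :
    ((PySem.List.pyRange 2 ((sortedl.length : Int) + 1) 1).flatMap
        (fun k => pyCombinations k.toNat sortedl)).map (fun s => PySem.Str.join " " s)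
    = (PySem.List.pyRange 2 ((sortedl.length : Int) + 1) 1).flatMap
        (fun k => ((powersetB sortedl).filter (fun s => (s.length : Int) == k)).map
          (fun s => PySem.Str.join " " s)) := by
  rw [List.map_flatMap]
  apply flatMap_congr_mem
  intro k hk
  have h2 : 2 ≤ k := (PySem.List.mem_pyRange_one.mp hk).1
  have hfil : (powersetB sortedl).filter (fun s => (s.length : Int) == k)
      = (powersetB sortedl).filter (fun s => s.length == k.toNat) := by
    apply List.filter_congr
    intro s _
    have : ((s.length : Int) == k) = (s.length == k.toNat) := by
      by_cases h : (s.length : Int) = k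
      · have : s.length = k.toNat := by omega
        simp_all
      · have : s.length ≠ k.toNat := by omega
        simp_all
    rw [this]
  rw [hfil, powersetB_filter_eq]

-- the main loops agree, with generalized accumulators (B's carries the joined strings)
theorem fold_eq (l : List (List String)) (acc : List (List String)) :
    (l.foldl (fun acc col_list =>
      let sortedl := PySem.List.sorted col_list (fun x => x) false
      let list_lenght : Int := sortedl.length
      if list_lenght > 1 then
        (PySem.List.pyRange 2 (list_lenght + 1) 1).foldl (fun acc2 lenght =>
          (pyCombinations lenght.toNat sortedl).foldl (fun a subset => a ++ [subset]) acc2) acc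
      else acc) acc).map (fun s => PySem.Str.join " " s)
    = l.foldl (fun result col_list =>
      let sortedl := PySem.List.sorted col_list (fun x => x) false
      let n : Int := sortedl.length
      if n > 1 then
        let subsets := powersetB sortedl
        (PySem.List.pyRange 2 (n + 1) 1).foldl (fun r k =>
          r ++ ((subsets.filter (fun s => (s.length : Int) == k)).map
            (fun s => PySem.Str.join " " s))) result
      else result) (acc.map (fun s => PySem.Str.join " " s)) := by
  induction l generalizing acc with
  | nil => rfl
  | cons c t ih =>
    simp only [List.foldl_cons]
    refine Eq.trans (ih _) ?_
    congr 1
    set sortedl := PySem.List.sorted c (fun x => x) false with hs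
    by_cases hlen : (sortedl.length : Int) > 1
    · simp only [hlen, if_pos]
      have hA : ∀ (a0 : List (List String)),
          (PySem.List.pyRange 2 ((sortedl.length : Int) + 1) 1).foldl (fun acc2 lenght =>
            (pyCombinations lenght.toNat sortedl).foldl (fun a subset => a ++ [subset]) acc2) a0
          = a0 ++ (PySem.List.pyRange 2 ((sortedl.length : Int) + 1) 1).flatMap
              (fun k => pyCombinations k.toNat sortedl) := by
        intro a0
        have : ∀ acc2 lenght, (pyCombinations lenght sortedl).foldl
            (fun a subset => a ++ [subset]) acc2 = acc2 ++ pyCombinations lenght sortedl :=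
          fun acc2 lenght => PySem.List.foldl_append_singleton_eq_self _ _
        simp only [this]
        exact PySem.List.foldl_append_eq_flatMap _ _ _
      have hB : ∀ (r0 : List String),
          (PySem.List.pyRange 2 ((sortedl.length : Int) + 1) 1).foldl (fun r k =>
            r ++ (((powersetB sortedl).filter (fun s => (s.length : Int) == k)).map
              (fun s => PySem.Str.join " " s))) r0
          = r0 ++ (PySem.List.pyRange 2 ((sortedl.length : Int) + 1) 1).flatMap
              (fun k => (((powersetB sortedl).filter (fun s => (s.length : Int) == k)).map
                (fun s => PySem.Str.join " " s))) :=
        fun r0 => PySem.List.foldl_append_eq_flatMap _ _ _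
      rw [hA, hB, List.map_append, per_list_eq]
    · simp only [hlen, if_false]

-- ===== VERDICT (by name: the statement is the Claim_ definition above) =====
theorem gen_dummy_cols_inner_combinations_spec : Claim_equal_gen_dummy_cols_inner_combinations := by
  intro dummy_col_names _
  show _ = _
  unfold gen_dummy_cols_inner_combinations gen_dummy_cols_inner_combinations_alt
  simp only [List.map_id']
  exact fold_eq dummy_col_names []
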